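-- pv_equiv track=rewrite | github.com/adap/flower | framework/dev/pyproject_meta.py | _find_project_bounds
-- ===== SOURCE A (Python) =====
-- class ProjectSectionError(RuntimeError):
--     """Raised when [project] metadata is missing or malformed."""
--
-- def _find_project_bounds(lines: list[str]) -> tuple[int, int]:
--     start = -1
--     for idx, line in enumerate(lines):
--         if line.strip() == "[project]":
--             start = idx
--             break
--
--     if start == -1:
--         raise ProjectSectionError("Missing [project] section in pyproject.toml")
--
--     end = len(lines)
--     for idx in range(start + 1, len(lines)):
--         stripped = lines[idx].strip()
--         if stripped.startswith("[") and stripped.endswith("]"):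
--             end = idx
--             break
--
--     return start, end
-- ===== SOURCE B (Python) =====
-- class ProjectSectionError(RuntimeError):
--     """Raised when [project] metadata is missing or malformed."""
--
-- def _find_project_bounds(lines: list[str]) -> tuple[int, int]:
--     # One pass building an index of all section-header lines, then a lookup.
--     headers = []
--     for i, line in enumerate(lines):
--         s = line.strip()
--         if s.startswith("[") and s.endswith("]"):
--             headers.append((i, s))
--     for pos, (i, s) in enumerate(headers):
--         if s == "[project]":
--             end = headers[pos + 1][0] if pos + 1 < len(headers) else len(lines)
--             return i, end
--     raise ProjectSectionError("Missing [project] section in pyproject.toml")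
-- ===== Notes on version B (the rewrite author's own statement) =====
-- stated objective: alternative
-- what changed: B first builds an index of all section-header lines in one pass, then looks up '[project]' in that index and takes the next header entry as the end, instead of A's two separate scans with break.
import Mathlib
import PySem

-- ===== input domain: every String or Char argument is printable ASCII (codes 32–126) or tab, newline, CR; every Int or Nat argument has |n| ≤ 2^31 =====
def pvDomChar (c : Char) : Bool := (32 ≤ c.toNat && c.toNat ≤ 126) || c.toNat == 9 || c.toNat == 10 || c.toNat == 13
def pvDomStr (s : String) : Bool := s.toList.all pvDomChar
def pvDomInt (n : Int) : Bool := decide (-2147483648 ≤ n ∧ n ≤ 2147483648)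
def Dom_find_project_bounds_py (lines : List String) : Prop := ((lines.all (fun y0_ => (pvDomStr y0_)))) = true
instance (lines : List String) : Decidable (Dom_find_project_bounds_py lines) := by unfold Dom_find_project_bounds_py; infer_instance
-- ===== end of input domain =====

-- B builds a one-pass index of all section-header lines, then looks up "[project]" and the
-- following header entry; A scans twice with break. Equivalence is about the return value;
-- where no "[project]" line exists both Pythons raise ProjectSectionError (excluded by Pre_).

-- shared header test: stripped.startswith("[") and stripped.endswith("]")
def pvIsHeader (s : String) : Bool :=
  PySem.Str.startswith s "[" && PySem.Str.endswith s "]"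

-- ===== PORT A =====
-- first loop of A: first index whose stripped line is "[project]", together with the remaining
-- suffix lines[start+1:] that A's second range-loop then scans
def pvAStart : List String → Nat → Option (Nat × List String)
  | [], _ => none
  | l :: rest, i =>
    if PySem.Str.strip l = "[project]" then some (i, rest) else pvAStart rest (i + 1)

-- second loop of A over indices start+1 … len-1 (scanning the suffix), default end = total
def pvAEnd : List String → Nat → Nat → Nat
  | [], _, total => total
  | l :: rest, i, total =>
    if pvIsHeader (PySem.Str.strip l) then i
    else pvAEnd rest (i + 1) total

def find_project_bounds_py (lines : List String) : Int × Int :=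
  match pvAStart lines 0 with
  | none => (-1, -1)   -- Python raises ProjectSectionError here (excluded by Pre_)
  | some (s, rest) => ((s : Int), (pvAEnd rest (s + 1) lines.length : Int))

-- ===== PORT B =====
-- one pass: index of every header line as (idx, stripped)
def pvBHeaders : List String → Nat → List (Nat × String)
  | [], _ => []
  | l :: rest, i =>
    if pvIsHeader (PySem.Str.strip l) then
      (i, PySem.Str.strip l) :: pvBHeaders rest (i + 1)
    else pvBHeaders rest (i + 1)

-- lookup of "[project]" in the header index; end = idx of the next header entry, else total
def pvBFind : List (Nat × String) → Nat → Int × Int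
  | [], _ => (-1, -1)   -- Python raises ProjectSectionError here (excluded by Pre_)
  | (i, s) :: rest, total =>
    if s = "[project]" then
      ((i : Int), match rest with | [] => (total : Int) | (j, _) :: _ => (j : Int))
    else pvBFind rest total

def find_project_bounds_py_alt (lines : List String) : Int × Int :=
  pvBFind (pvBHeaders lines 0) lines.length

-- ===== PRECONDITION & SPEC =====
-- Pre_ excludes exactly the inputs with no line stripping to "[project]", on which A raises
-- ProjectSectionError (and B raises the same).
def Pre_find_project_bounds_py (lines : List String) : Prop :=
  ∃ l ∈ lines, PySem.Str.strip l = "[project]"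
instance (lines : List String) : Decidable (Pre_find_project_bounds_py lines) := by
  unfold Pre_find_project_bounds_py; infer_instance

def pvWitness_find_project_bounds_py : List String :=
  ["[project]", "name = \"x\"", "[tool]"]

def Spec_find_project_bounds_py (lines : List String) (out : Int × Int) : Prop := out = find_project_bounds_py_alt lines
instance (lines : List String) (out : Int × Int) : Decidable (Spec_find_project_bounds_py lines out) := by unfold Spec_find_project_bounds_py; infer_instance

-- ===== CLAIM (what is proved, stated in full; the proofs are below) =====
def Claim_equal_find_project_bounds_py : Prop := ∀ (lines : List String), Dom_find_project_bounds_py lines → Pre_find_project_bounds_py lines → Spec_find_project_bounds_py lines (find_project_bounds_py lines)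

-- ===== LEMMAS AND PROOFS =====

-- A's second loop returns the index of the first header in the suffix, else the default total;
-- that is exactly the head of B's header index of the suffix.
theorem pvAEnd_eq_headers (lines : List String) : ∀ (i total : Nat),
    pvAEnd lines i total =
      match pvBHeaders lines i with
      | [] => total
      | (j, _) :: _ => j := by
  induction lines with
  | nil => intro i total; simp [pvAEnd, pvBHeaders]
  | cons l rest ih =>
    intro i total
    simp only [pvAEnd, pvBHeaders]
    by_cases h : pvIsHeader (PySem.Str.strip l) = true
    · simp [h]
    · simp [h, ih]

-- main generalized equivalence of the two scans
theorem pv_main (lines : List String) : ∀ (i total : Nat),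
    (match pvAStart lines i with
      | none => ((-1 : Int), (-1 : Int))
      | some (s, rest) => ((s : Int), (pvAEnd rest (s + 1) total : Int))) =
    pvBFind (pvBHeaders lines i) total := by
  induction lines with
  | nil => intro i total; simp [pvAStart, pvBHeaders, pvBFind]
  | cons l rest ih =>
    intro i total
    by_cases hp : PySem.Str.strip l = "[project]"
    · have hph : pvIsHeader "[project]" = true := by decide
      simp only [pvAStart, pvBHeaders, hp, hph, if_true, pvBFind,
        pvAEnd_eq_headers]
      cases pvBHeaders rest (i + 1) with
      | nil => rfl
      | cons h t => rfl
    · simp only [pvAStart, pvBHeaders, if_neg hp]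
      by_cases hh : pvIsHeader (PySem.Str.strip l) = true
      · simp only [hh, if_true, pvBFind, if_neg hp]
        exact ih (i + 1) total
      · simp only [Bool.not_eq_true] at hh
        simp only [hh, Bool.false_eq_true, if_false]
        exact ih (i + 1) total

-- ===== VERDICT (by name: the statement is the Claim_ definition above) =====
theorem find_project_bounds_py_spec : Claim_equal_find_project_bounds_py := by
  intro lines _ _
  unfold Spec_find_project_bounds_py find_project_bounds_py find_project_bounds_py_alt
  exact pv_main lines 0 lines.length
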